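-- pv_equiv track=rewrite | github.com/icguy/RemoteSurf | test.py | add_level
-- ===== SOURCE A (Python) =====
-- def add_level(graph, cliques):
--     newcliques = set()
--     for c in cliques:
--         elem = c[0]
--         for n in graph[elem]:
--             if connected_to_all(graph, n, c):
--                 newclique = list(c)
--                 newclique.append(n)
--                 newcliques.add(tuple(sorted(newclique)))
--     return newcliques
--
-- def connected_to_all(graph, node, clique):
--     for n in clique:
--         if node not in graph[n]:
--             return False
--     return True
-- ===== SOURCE B (Python) =====
-- def add_level(graph, cliques):
--     newcliques = set()
--     for c in cliques:
--         common = set(graph[c[0]])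
--         for m in c[1:]:
--             common &= set(graph[m])
--         newcliques.update(tuple(sorted(list(c) + [n])) for n in common)
--     return newcliques
-- ===== Notes on version B (the rewrite author's own statement) =====
-- stated objective: alternative
-- what changed: Drops the connected_to_all helper and the per-candidate inner testing loop: B intersects the members' neighbor sets once per clique and extends the clique by every element of that common set in one update, instead of rescanning every member's adjacency list for each candidate.
-- outside the precondition, e.g. on add_level({1: []}, {(1, 2)}): A returns set(), B raises KeyError
import Mathlib
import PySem

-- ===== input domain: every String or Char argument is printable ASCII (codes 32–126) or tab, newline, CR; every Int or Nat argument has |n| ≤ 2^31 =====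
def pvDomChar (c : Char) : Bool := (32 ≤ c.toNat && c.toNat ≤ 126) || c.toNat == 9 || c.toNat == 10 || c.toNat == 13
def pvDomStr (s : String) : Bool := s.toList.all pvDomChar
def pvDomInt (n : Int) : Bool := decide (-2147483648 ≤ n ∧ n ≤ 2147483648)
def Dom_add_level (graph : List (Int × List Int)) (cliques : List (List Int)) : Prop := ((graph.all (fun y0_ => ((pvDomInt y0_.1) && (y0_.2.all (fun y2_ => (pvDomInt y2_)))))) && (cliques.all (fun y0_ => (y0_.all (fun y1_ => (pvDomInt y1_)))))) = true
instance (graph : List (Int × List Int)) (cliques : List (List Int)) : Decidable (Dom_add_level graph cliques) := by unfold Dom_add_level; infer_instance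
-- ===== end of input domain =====

-- B drops the connected_to_all helper and the per-candidate testing loop: one set
-- intersection of the members' neighbor sets per clique, then a single set update
-- (objective: alternative; return value only).

-- ===== PORT A =====
def connected_to_all (graph : List (Int × List Int)) (node : Int) : List Int → Bool
  | [] => true
  | n :: rest =>
      -- 'if node not in graph[n]: return False'; Pre_ guarantees the key is present
      if node ∉ (PySem.Dict.mk graph).getD n [] then false
      else connected_to_all graph node rest

def add_level (graph : List (Int × List Int)) (cliques : List (List Int)) : List (List Int) :=
  cliques.foldl (fun newcliques c =>
      let elem := c.headD 0   -- c[0]; Pre_ guarantees c ≠ []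
      ((PySem.Dict.mk graph).getD elem []).foldl (fun nc n =>
          if connected_to_all graph n c then
            PySem.Set.add nc (PySem.List.sorted (c ++ [n]) (fun x => x) false)
          else nc)
        newcliques)
    []

-- ===== PORT B =====
def add_level_alt (graph : List (Int × List Int)) (cliques : List (List Int)) : List (List Int) :=
  cliques.foldl (fun newcliques c =>
      -- 'common = set(graph[c[0]])' then 'common &= set(graph[m])' over c[1:]
      let common :=
        (c.drop 1).foldl
          (fun s m => PySem.Set.inter s (PySem.Set.ofList ((PySem.Dict.mk graph).getD m [])))
          (PySem.Set.ofList ((PySem.Dict.mk graph).getD (c.headD 0) []))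
      -- 'newcliques.update(tuple(sorted(list(c) + [n])) for n in common)'
      PySem.Set.update newcliques
        (common.map (fun n => PySem.List.sorted (c ++ [n]) (fun x => x) false)))
    []

-- ===== PRECONDITION & SPEC =====
-- Pre_ excludes inputs where A or B raises: an empty clique (IndexError at c[0]) and a clique
-- member missing from graph (KeyError); A's member lookups are lazy, so A can still return on
-- some missing-member inputs where B's eager per-clique intersection raises KeyError.
def Pre_add_level (graph : List (Int × List Int)) (cliques : List (List Int)) : Prop :=
  ∀ c ∈ cliques, c ≠ [] ∧ ∀ m ∈ c, (PySem.Dict.mk graph).contains m = true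
instance (graph : List (Int × List Int)) (cliques : List (List Int)) : Decidable (Pre_add_level graph cliques) := by unfold Pre_add_level; infer_instance

def pvWitness_add_level : (List (Int × List Int)) × List (List Int) :=
  ([(1, [2, 3]), (2, [1, 3]), (3, [1, 2])], [[1, 2], [2, 3]])

def Spec_add_level (graph : List (Int × List Int)) (cliques : List (List Int)) (out : List (List Int)) : Prop := out = add_level_alt graph cliques
instance (graph : List (Int × List Int)) (cliques : List (List Int)) (out : List (List Int)) : Decidable (Spec_add_level graph cliques out) := by unfold Spec_add_level; infer_instance

-- ===== CLAIM (what is proved, stated in full; the proofs are below) =====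
def Claim_equal_add_level : Prop := ∀ (graph : List (Int × List Int)) (cliques : List (List Int)), Dom_add_level graph cliques → Pre_add_level graph cliques → Spec_add_level graph cliques (add_level graph cliques)

-- ===== LEMMAS AND PROOFS =====

-- A's guarded fold of Set.add is Set.update with the filtered, mapped list.
lemma foldl_add_if_eq_update (p : Int → Bool) (f : Int → List Int)
    (l : List Int) (s : PySem.Set (List Int)) :
    l.foldl (fun nc n => if p n then PySem.Set.add nc (f n) else nc) s
      = PySem.Set.update s ((l.filter p).map f) := by
  induction l generalizing s with
  | nil => rfl
  | cons x l ih =>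
      by_cases h : p x = true
      · simp [h, ih, PySem.Set.update]
      · simp [h, ih, PySem.Set.update]

-- folding set intersection = one filter by "in every later member's adjacency"
lemma foldl_inter_eq_filter (g : Int → List Int) (l : List Int) (s : PySem.Set Int) :
    l.foldl (fun s m => PySem.Set.inter s (PySem.Set.ofList (g m))) s
      = s.filter (fun n => l.all (fun m => (PySem.Set.ofList (g m)).contains n)) := by
  induction l generalizing s with
  | nil => simp
  | cons m l ih =>
      rw [List.foldl_cons, ih, PySem.Set.inter, List.filter_filter]
      apply List.filter_congr
      intro n _
      simp [Bool.and_comm]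

-- removing the occurrences of one already-present image is a no-op for update
lemma update_filter_ne_eq (f : Int → List Int) (x : Int)
    (M : List Int) (s : PySem.Set (List Int)) (hx : f x ∈ s) :
    PySem.Set.update s ((M.filter (fun y => !(y == x))).map f)
      = PySem.Set.update s (M.map f) := by
  induction M generalizing s with
  | nil => rfl
  | cons y M ih =>
      by_cases h : y = x
      · subst h
        have hadd : PySem.Set.add s (f y) = s := by
          simp [PySem.Set.add, PySem.Set.contains, hx]
        have hfc : (y :: M).filter (fun z => !(z == y)) = M.filter (fun z => !(z == y)) :=
          List.filter_cons_of_neg (by simp)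
        rw [hfc]
        show PySem.Set.update s _ = List.foldl PySem.Set.add (PySem.Set.add s (f y)) _
        rw [hadd]
        exact ih s hx
      · have hmem : f x ∈ PySem.Set.add s (f y) := by
          rw [PySem.Set.mem_add]; exact Or.inl hx
        have hfc : (y :: M).filter (fun z => !(z == x)) = y :: M.filter (fun z => !(z == x)) :=
          List.filter_cons_of_pos (by simp [h])
        rw [hfc]
        show PySem.Set.update (PySem.Set.add s (f y)) _ = _
        exact ih _ hmem

-- duplicates add nothing: update over a list = update over its set of elements
lemma update_map_ofList (f : Int → List Int) (L : List Int) (s : PySem.Set (List Int)) :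
    PySem.Set.update s (L.map f) = PySem.Set.update s ((PySem.Set.ofList L).map f) := by
  induction L generalizing s with
  | nil => rfl
  | cons x L ih =>
      rw [PySem.Set.ofList_cons]
      have hx : f x ∈ PySem.Set.add s (f x) := by
        rw [PySem.Set.mem_add]; exact Or.inr rfl
      calc PySem.Set.update s ((x :: L).map f)
          = PySem.Set.update (PySem.Set.add s (f x)) (L.map f) := by
            simp [PySem.Set.update]
        _ = PySem.Set.update (PySem.Set.add s (f x)) ((PySem.Set.ofList L).map f) := ih _
        _ = PySem.Set.update (PySem.Set.add s (f x))
              (((PySem.Set.ofList L).discard x).map f) :=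
            (update_filter_ne_eq f x (PySem.Set.ofList L) _ hx).symm
        _ = PySem.Set.update s ((x :: (PySem.Set.ofList L).discard x).map f) := by
            simp [PySem.Set.update]

-- set(l) filtered = set(l filtered)
lemma ofList_filter (p : Int → Bool) (l : List Int) :
    PySem.Set.ofList (l.filter p) = (PySem.Set.ofList l).filter p := by
  induction l with
  | nil => rfl
  | cons x l ih =>
      by_cases h : p x = true
      · rw [List.filter_cons_of_pos h, PySem.Set.ofList_cons, PySem.Set.ofList_cons,
          List.filter_cons_of_pos h, ih, PySem.Set.discard, PySem.Set.discard,
          List.filter_filter, List.filter_filter]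
        congr 1
        apply List.filter_congr
        intro y _
        exact Bool.and_comm _ _
      · rw [List.filter_cons_of_neg h, ih, PySem.Set.ofList_cons, List.filter_cons_of_neg h,
          PySem.Set.discard, List.filter_filter]
        apply List.filter_congr
        intro y _
        by_cases hy : p y = true
        · have : ¬ y = x := fun he => h (he ▸ hy)
          simp [hy, this]
        · simp [Bool.eq_false_iff.mpr hy]

lemma connected_iff (graph : List (Int × List Int)) (node : Int) (c : List Int) :
    connected_to_all graph node c = true ↔
      ∀ m ∈ c, node ∈ (PySem.Dict.mk graph).getD m [] := by
  induction c with
  | nil => simp [connected_to_all]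
  | cons m rest ih =>
      by_cases h : node ∈ (PySem.Dict.mk graph).getD m []
      · simp [connected_to_all, h, ih]
      · simp [connected_to_all, h]

-- on candidates drawn from graph[c[0]], A's test = membership in every later member's adjacency
lemma cond_agree (graph : List (Int × List Int)) (c : List Int) (n : Int)
    (hn : n ∈ (PySem.Dict.mk graph).getD (c.headD 0) []) :
    connected_to_all graph n c
      = (c.drop 1).all (fun m =>
          (PySem.Set.ofList ((PySem.Dict.mk graph).getD m [])).contains n) := by
  have hmem : ∀ m, (PySem.Set.ofList ((PySem.Dict.mk graph).getD m [])).contains n = true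
      ↔ n ∈ (PySem.Dict.mk graph).getD m [] := by
    intro m
    simp [PySem.Set.contains, PySem.Set.mem_ofList]
  cases c with
  | nil => simp [connected_to_all]
  | cons c0 rest =>
      rw [Bool.eq_iff_iff, connected_iff, List.all_eq_true]
      constructor
      · intro h m hm
        exact (hmem m).mpr (h m (List.mem_cons_of_mem _ hm))
      · intro h m hm
        rcases List.mem_cons.mp hm with h0 | hr
        · subst h0; exact hn
        · exact (hmem m).mp (h m hr)

-- the per-clique bodies of the two folds agree
lemma step_eq (graph : List (Int × List Int)) (c : List Int) (acc : List (List Int)) :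
    ((PySem.Dict.mk graph).getD (c.headD 0) []).foldl (fun nc n =>
        if connected_to_all graph n c then
          PySem.Set.add nc (PySem.List.sorted (c ++ [n]) (fun x => x) false)
        else nc) acc
    = PySem.Set.update acc
        (((c.drop 1).foldl
            (fun s m => PySem.Set.inter s (PySem.Set.ofList ((PySem.Dict.mk graph).getD m [])))
            (PySem.Set.ofList ((PySem.Dict.mk graph).getD (c.headD 0) []))).map
          (fun n => PySem.List.sorted (c ++ [n]) (fun x => x) false)) := by
  set cands := (PySem.Dict.mk graph).getD (c.headD 0) [] with hcands
  set pB := fun n => (c.drop 1).all (fun m =>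
      (PySem.Set.ofList ((PySem.Dict.mk graph).getD m [])).contains n) with hpB
  rw [foldl_add_if_eq_update, foldl_inter_eq_filter]
  have hfilter : cands.filter (fun n => connected_to_all graph n c) = cands.filter pB := by
    apply List.filter_congr
    intro n hn
    exact cond_agree graph c n hn
  rw [hfilter, update_map_ofList, ofList_filter]

-- ===== VERDICT (by name: the statement is the Claim_ definition above) =====
theorem add_level_spec : Claim_equal_add_level := by
  intro graph cliques _ _
  unfold Spec_add_level add_level add_level_alt
  apply PySem.List.foldl_congr_mem
  intro acc c _
  exact step_eq graph c acc
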